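-- pv_equiv track=rewrite | github.com/u6684258/instance-generator | src/instance_generator/asp_translator.py | translate_to_asp_variable
-- ===== SOURCE A (Python) =====
-- def replace_special_symbols(string: str):
--     # symbols '@' and '-' are replaced with '_AT_' and '_DASH_', respectively
--     output = string
--     for replacement in [('@', '_AT_'), ('-', '_DASH_')]:
--         output = output.replace(*replacement)
--     return output
--
-- def get_forbidden_symbols(string: str):
--     # clingo allows the following symbols for constants and variables: [A-Za-z0-9_’]
--     allowed_symbols = [chr(c) for c in range(ord('a'), ord('z')+1)] + [chr(c)
--             for c in range(ord('A'), ord('Z')+1)] + [str(n) for n in range(10)] + ['_', '’']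
--     return [sym for sym in string if sym not in allowed_symbols]
--
-- def get_index_of_first_non_underscore(string: str):
--     for i in range(len(string)):
--         if string[i] != '_':
--             return i
--     return None
--
-- def translate_to_asp_variable(pddl_variable: str):
--     assert pddl_variable[0] == "?"
--     asp_variable = pddl_variable[1:].upper()
--       # Variables in clingo must start with a upper case letter. We transform
--       # the entire variable to lower case so that "var", "VAR" and "Var"
--       # (identical variables in PDDL) are mapped to the same transformed
--       # string.
--
--     # replace forbidden symbols '@' and '-'
--     forbidden_symbols = get_forbidden_symbols(asp_variable)
--     if '@' in forbidden_symbols or '-' in forbidden_symbols: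
--         asp_variable = replace_special_symbols(asp_variable)
--         forbidden_symbols = [sym for sym in forbidden_symbols if sym not in ['@',
--             '-']]
--     assert(len(forbidden_symbols) == 0)
--
--     # check if first character, potentially after a sequence of underscores
--     # '_', is a letter, if not add prefix 'Var_'
--     first_non_underscore = get_index_of_first_non_underscore(asp_variable)
--     if first_non_underscore is None or not asp_variable[first_non_underscore].isalpha():
--         asp_variable = "Var_" + asp_variable
--
--     return asp_variable
-- ===== SOURCE B (Python) =====
-- def translate_to_asp_variable(pddl_variable: str):
--     assert pddl_variable[0] == "?"
--     pieces = []
--     for ch in pddl_variable[1:].upper():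
--         if ch == '@':
--             pieces.append('_AT_')
--         elif ch == '-':
--             pieces.append('_DASH_')
--         elif ch.isalnum() or ch in '_’':
--             pieces.append(ch)
--         else:
--             assert False
--     asp_variable = ''.join(pieces)
--     stripped = asp_variable.lstrip('_')
--     if not (stripped and stripped[0].isalpha()):
--         asp_variable = 'Var_' + asp_variable
--     return asp_variable
-- ===== Notes on version B (the rewrite author's own statement) =====
-- stated objective: simpler
-- what changed: Replaces A's three helper scans (building a forbidden-symbol list against a 64-entry allowed list, two sequential str.replace passes, and an index search for the first non-underscore) with a single character-by-character pass that emits '_AT_'/'_DASH_'/the char directly, followed by lstrip('_') for the prefix check.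
import Mathlib
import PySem

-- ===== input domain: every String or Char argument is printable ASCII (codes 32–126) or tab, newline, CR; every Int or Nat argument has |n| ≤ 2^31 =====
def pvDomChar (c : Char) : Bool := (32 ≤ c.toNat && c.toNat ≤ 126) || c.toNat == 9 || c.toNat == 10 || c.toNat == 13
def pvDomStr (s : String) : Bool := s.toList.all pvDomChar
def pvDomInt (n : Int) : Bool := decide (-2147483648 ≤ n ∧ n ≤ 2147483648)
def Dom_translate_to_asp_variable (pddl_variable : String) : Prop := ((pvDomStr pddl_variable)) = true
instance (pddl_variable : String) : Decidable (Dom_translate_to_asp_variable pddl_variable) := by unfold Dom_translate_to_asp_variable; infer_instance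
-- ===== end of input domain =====

-- B replaces A's three helper scans (forbidden-symbol list, two str.replace passes, index
-- search) by one character-by-character pass that builds the result directly; objective:
-- simpler, same asymptotic cost.

-- ===== PORT A =====

-- for replacement in [('@','_AT_'), ('-','_DASH_')]: output = output.replace(*replacement)
def pvReplaceSpecialSymbols (s : List Char) : List Char :=
  [("@".toList, "_AT_".toList), ("-".toList, "_DASH_".toList)].foldl
    (fun output r => PySem.Chars.replace output r.1 r.2) s

-- allowed_symbols = [chr(c) for c in range(ord('a'), ord('z')+1)] + … ; every entry is a
-- single character, so the Python list of 1-char strings is ported as a list of chars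
-- (str(n) for n in range(10) is the single digit character chr(48+n) — exact).
def pvAllowedSymbols : List Char :=
  ((PySem.List.pyRange 97 123 1).map (fun c => Char.ofNat c.toNat))
    ++ ((PySem.List.pyRange 65 91 1).map (fun c => Char.ofNat c.toNat))
    ++ ((PySem.List.pyRange 0 10 1).map (fun n => Char.ofNat (48 + n.toNat)))
    ++ ['_', '’']

def pvGetForbiddenSymbols (s : List Char) : List Char :=
  s.filter (fun sym => !(pvAllowedSymbols.contains sym))

-- get_index_of_first_non_underscore: index scan with early return
def pvFirstNonUnderscore : List Char → Option Nat
  | [] => none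
  | c :: rest => if c ≠ '_' then some 0 else (pvFirstNonUnderscore rest).map (· + 1)

def translate_to_asp_variable (pddl_variable : String) : String :=
  let cs := pddl_variable.toList
  -- assert pddl_variable[0] == "?" — IndexError/AssertionError on failure, excluded by Pre_
  if cs.head? ≠ some '?' then "" else
  let asp0 := PySem.Chars.upper (PySem.List.slice cs (some 1) none)
  let forbidden := pvGetForbiddenSymbols asp0
  let asp1 := if forbidden.contains '@' || forbidden.contains '-'
              then pvReplaceSpecialSymbols asp0 else asp0
  let forbidden2 := if forbidden.contains '@' || forbidden.contains '-'
              then forbidden.filter (fun sym => !(['@', '-'].contains sym)) else forbidden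
  -- assert len(forbidden_symbols) == 0 — AssertionError on failure, excluded by Pre_
  if forbidden2.length ≠ 0 then "" else
  match pvFirstNonUnderscore asp1 with
  | none => String.ofList ("Var_".toList ++ asp1)
  | some i =>
      -- asp_variable[first_non_underscore]: i is a valid index here, so getD is exact
      if !(PySem.Chars.isalpha (asp1.getD i ' ')) then String.ofList ("Var_".toList ++ asp1)
      else String.ofList asp1

-- ===== PORT B =====

def translate_to_asp_variable_alt (pddl_variable : String) : String :=
  let cs := pddl_variable.toList
  -- assert pddl_variable[0] == "?" — excluded by Pre_
  if cs.head? ≠ some '?' then "" else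
  let up := PySem.Chars.upper (PySem.List.slice cs (some 1) none)
  let asp := up.foldl (fun acc ch =>
      if ch = '@' then acc ++ "_AT_".toList
      else if ch = '-' then acc ++ "_DASH_".toList
      else if PySem.Chars.isalnum ch || ch = '_' || ch = '’' then acc ++ [ch]
      else acc) []    -- 'assert False' branch (AssertionError), excluded by Pre_
  let stripped := asp.dropWhile (· == '_')   -- asp.lstrip('_'): drop leading '_'
  match stripped with
  | [] => String.ofList ("Var_".toList ++ asp)
  | c :: _ =>
      if PySem.Chars.isalpha c then String.ofList asp else String.ofList ("Var_".toList ++ asp)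

-- ===== PRECONDITION & SPEC =====
-- Pre_: exactly the inputs on which A returns (within the ASCII domain Dom_): the string
-- starts with '?' (else IndexError/AssertionError) and every later character is an ASCII
-- letter, digit, '_', '@' or '-' (any other character fails A's forbidden-symbol assert;
-- the only other character A accepts, '’', is non-ASCII and already outside Dom_).
def Pre_translate_to_asp_variable (pddl_variable : String) : Prop :=
  pddl_variable.toList.head? = some '?' ∧
  (pddl_variable.toList.drop 1).all
    (fun c => PySem.Chars.isalnum c || c == '_' || c == '@' || c == '-') = true
instance (pddl_variable : String) : Decidable (Pre_translate_to_asp_variable pddl_variable) := by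
  unfold Pre_translate_to_asp_variable; infer_instance

def pvWitness_translate_to_asp_variable : String := "?x-1"

def Spec_translate_to_asp_variable (pddl_variable : String) (out : String) : Prop :=
  out = translate_to_asp_variable_alt pddl_variable
instance (pddl_variable : String) (out : String) : Decidable (Spec_translate_to_asp_variable pddl_variable out) := by
  unfold Spec_translate_to_asp_variable; infer_instance

-- ===== CLAIM (what is proved, stated in full; the proofs are below) =====
def Claim_equal_translate_to_asp_variable : Prop :=
  ∀ (pddl_variable : String), Dom_translate_to_asp_variable pddl_variable →
    Pre_translate_to_asp_variable pddl_variable →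
    Spec_translate_to_asp_variable pddl_variable (translate_to_asp_variable pddl_variable)

-- ===== LEMMAS AND PROOFS =====

-- the per-character mapping both pipelines implement
def pvF (c : Char) : List Char :=
  if c = '@' then "_AT_".toList else if c = '-' then "_DASH_".toList else [c]

-- chars A accepts past the '?' (closed under upper(), see pv_ok_upper)
def pvOK (c : Char) : Prop :=
  PySem.Chars.isalnum c = true ∨ c = '_' ∨ c = '@' ∨ c = '-'

lemma pv_at : pvAllowedSymbols.contains '@' = false := by decide

lemma pv_dash : pvAllowedSymbols.contains '-' = false := by decide

lemma pv_toNat_ofNat (n : Nat) (h : n < 55296) : (Char.ofNat n).toNat = n := by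
  have hv : n.isValidChar := Or.inl h
  simp [Char.ofNat, hv, Char.toNat, Char.ofNatAux]

lemma pv_allowed_mem (c : Char) (h : PySem.Chars.isalnum c = true ∨ c = '_') :
    pvAllowedSymbols.contains c = true := by
  rw [List.contains_eq_mem, decide_eq_true_iff]
  have hself : Char.ofNat ((c.toNat : Int)).toNat = c := by
    simp [Char.ofNat_toNat]
  rcases h with h | rfl
  · simp only [PySem.Chars.isalnum, PySem.Chars.isalpha, PySem.Chars.isupper,
      PySem.Chars.islower, PySem.Chars.isdigit, Bool.or_eq_true, Bool.and_eq_true,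
      decide_eq_true_iff, Char.le_def, UInt32.le_iff_toNat_le, Char.toNat_val] at h
    have e1 : 'A'.toNat = 65 := rfl
    have e2 : 'Z'.toNat = 90 := rfl
    have e3 : 'a'.toNat = 97 := rfl
    have e4 : 'z'.toNat = 122 := rfl
    have e5 : '0'.toNat = 48 := rfl
    have e6 : '9'.toNat = 57 := rfl
    rw [e1, e2] at h; rw [e3, e4] at h; rw [e5, e6] at h
    simp only [pvAllowedSymbols, List.mem_append, List.mem_map]
    rcases h with (h | h) | h
    · exact Or.inl (Or.inl (Or.inr ⟨(c.toNat : Int), by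
        rw [PySem.List.mem_pyRange_one]; constructor; omega; exact hself⟩))
    · exact Or.inl (Or.inl (Or.inl ⟨(c.toNat : Int), by
        rw [PySem.List.mem_pyRange_one]; constructor; omega; exact hself⟩))
    · refine Or.inl (Or.inr ⟨((c.toNat - 48 : Nat) : Int), ?_, ?_⟩)
      · rw [PySem.List.mem_pyRange_one]; omega
      · have : 48 + ((c.toNat - 48 : Nat) : Int).toNat = c.toNat := by omega
        rw [this, Char.ofNat_toNat]
  · simp [pvAllowedSymbols]

lemma pv_ok_upper (c : Char) (h : pvOK c) : pvOK (PySem.Chars.upperChar c) := by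
  unfold PySem.Chars.upperChar
  by_cases hl : PySem.Chars.islower c = true
  · simp only [hl, if_true]
    have hb : 97 ≤ c.toNat ∧ c.toNat ≤ 122 := by
      simp only [PySem.Chars.islower, Bool.and_eq_true, decide_eq_true_iff, Char.le_def,
        UInt32.le_iff_toNat_le, Char.toNat_val] at hl
      have e3 : 'a'.toNat = 97 := rfl
      have e4 : 'z'.toNat = 122 := rfl
      omega
    have ht : (Char.ofNat (c.toNat - 32)).toNat = c.toNat - 32 := pv_toNat_ofNat _ (by omega)
    left
    simp only [PySem.Chars.isalnum, PySem.Chars.isalpha, PySem.Chars.isupper,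
      Bool.or_eq_true, Bool.and_eq_true, decide_eq_true_iff, Char.le_def,
      UInt32.le_iff_toNat_le, Char.toNat_val]
    have e1 : 'A'.toNat = 65 := rfl
    have e2 : 'Z'.toNat = 90 := rfl
    left; left; rw [e1, e2, ht]; omega
  · simpa [hl] using h

lemma pv_forbidden_eq (u : List Char) (h : ∀ c ∈ u, pvOK c) :
    pvGetForbiddenSymbols u = u.filter (fun c => c == '@' || c == '-') := by
  unfold pvGetForbiddenSymbols
  refine List.filter_congr (fun c hc => ?_)
  show (!pvAllowedSymbols.contains c) = (c == '@' || c == '-')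
  rcases h c hc with h' | rfl | rfl | rfl
  · have hm := pv_allowed_mem c (Or.inl h')
    have h1 : (c == '@') = false := by
      rcases Bool.eq_false_or_eq_true (c == '@') with ht | hf
      · rw [beq_iff_eq] at ht; subst ht; exact absurd h' (by decide)
      · exact hf
    have h2 : (c == '-') = false := by
      rcases Bool.eq_false_or_eq_true (c == '-') with ht | hf
      · rw [beq_iff_eq] at ht; subst ht; exact absurd h' (by decide)
      · exact hf
    rw [hm, h1, h2]; rfl
  · rw [pv_allowed_mem '_' (Or.inr rfl)]; rfl
  · rw [pv_at]; rfl
  · rw [pv_dash]; rfl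

lemma pv_go_single (c₀ : Char) (w : List Char) :
    ∀ fuel l acc, l.length ≤ fuel →
      PySem.Chars.replace.go [c₀] w fuel l acc
        = acc.reverse ++ l.flatMap (fun c => if c = c₀ then w else [c]) := by
  intro fuel
  induction fuel with
  | zero =>
      intro l acc hl
      have : l = [] := List.eq_nil_of_length_eq_zero (by omega)
      subst this
      simp [PySem.Chars.replace.go]
  | succ n ih =>
      intro l acc hl
      cases l with
      | nil => simp [PySem.Chars.replace.go]
      | cons c t =>
          rw [PySem.Chars.replace.go]
          by_cases hc : c = c₀
          · subst hc
            have hp : [c].isPrefixOf (c :: t) = true := by simp [List.isPrefixOf]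
            rw [if_pos hp]
            simp only [List.length_cons] at hl
            rw [ih _ _ (by simp; omega)]
            simp
          · have hp : [c₀].isPrefixOf (c :: t) = false := by
              simp [List.isPrefixOf, Ne.symm hc]
            rw [if_neg (by simp [hp])]
            simp only [List.length_cons] at hl
            rw [ih _ _ (by omega)]
            simp [hc]

lemma pv_replace_single (l : List Char) (c₀ : Char) (w : List Char) :
    PySem.Chars.replace l [c₀] w = l.flatMap (fun c => if c = c₀ then w else [c]) := by
  rw [PySem.Chars.replace, if_neg (by simp)]
  simpa using pv_go_single c₀ w l.length l [] (le_refl _)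

lemma pv_chain (u : List Char) : pvReplaceSpecialSymbols u = u.flatMap pvF := by
  show PySem.Chars.replace (PySem.Chars.replace u "@".toList "_AT_".toList)
    "-".toList "_DASH_".toList = _
  have h1 : "@".toList = ['@'] := rfl
  have h2 : "-".toList = ['-'] := rfl
  rw [h1, h2, pv_replace_single, pv_replace_single, List.flatMap_assoc]
  refine List.flatMap_congr (fun c _ => ?_)
  by_cases hc : c = '@'
  · subst hc; decide
  · by_cases hd : c = '-'
    · subst hd; simp [pvF]
    · simp [pvF, hc, hd]

lemma pv_fold_eq (u : List Char) (h : ∀ c ∈ u, pvOK c) :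
    u.foldl (fun acc ch =>
      if ch = '@' then acc ++ "_AT_".toList
      else if ch = '-' then acc ++ "_DASH_".toList
      else if PySem.Chars.isalnum ch || ch = '_' || ch = '’' then acc ++ [ch]
      else acc) [] = u.flatMap pvF := by
  rw [PySem.List.foldl_congr_mem u _ (fun acc ch => acc ++ pvF ch) []
    (fun acc x hx => ?_), PySem.List.foldl_append_eq_flatMap]
  · simp
  · rcases h x hx with h' | rfl | rfl | rfl
    · have h1 : x ≠ '@' := fun e => absurd h' (by rw [e]; decide)
      have h2 : x ≠ '-' := fun e => absurd h' (by rw [e]; decide)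
      simp [pvF, h1, h2, h']
    · simp [pvF]
    · simp [pvF]
    · simp [pvF]

lemma pv_keep_bool (s : List Char) :
    (match pvFirstNonUnderscore s with
     | none => false
     | some i => PySem.Chars.isalpha (s.getD i ' '))
    = (match s.dropWhile (· == '_') with
       | [] => false
       | c :: _ => PySem.Chars.isalpha c) := by
  induction s with
  | nil => simp [pvFirstNonUnderscore]
  | cons c rest ih =>
      by_cases hc : c = '_'
      · subst hc
        rw [pvFirstNonUnderscore, if_neg (by simp)]
        rw [List.dropWhile_cons_of_pos (by simp)]
        rw [← ih]
        cases pvFirstNonUnderscore rest <;> simp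
      · rw [pvFirstNonUnderscore, if_pos hc]
        rw [List.dropWhile_cons_of_neg (by simp [hc])]
        simp

lemma pv_tail_eq (m : List Char) :
    (match pvFirstNonUnderscore m with
     | none => String.ofList ("Var_".toList ++ m)
     | some i => if !(PySem.Chars.isalpha (m.getD i ' '))
                 then String.ofList ("Var_".toList ++ m) else String.ofList m)
    = (match m.dropWhile (· == '_') with
       | [] => String.ofList ("Var_".toList ++ m)
       | c :: _ => if PySem.Chars.isalpha c then String.ofList m
                   else String.ofList ("Var_".toList ++ m)) := by
  have hb := pv_keep_bool m
  cases hA : pvFirstNonUnderscore m <;> cases hB : m.dropWhile (· == '_') <;>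
    simp only [hA, hB] at hb ⊢
  case none.cons c t => rw [← hb]; simp
  case some.nil i => rw [hb]; simp
  case some.cons i c t => rw [hb]; cases PySem.Chars.isalpha c <;> simp

-- ===== VERDICT (by name: the statement is the Claim_ definition above) =====
theorem translate_to_asp_variable_spec : Claim_equal_translate_to_asp_variable := by
  intro s _hDom hPre
  obtain ⟨h0, h1⟩ := hPre
  unfold Spec_translate_to_asp_variable translate_to_asp_variable translate_to_asp_variable_alt
  simp only [h0, ne_eq, not_true_eq_false, if_false]
  rw [PySem.List.slice_from_one]
  set u := PySem.Chars.upper s.toList.tail with hu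
  have hOKu : ∀ c ∈ u, pvOK c := by
    intro c hc
    rw [hu, PySem.Chars.upper, List.mem_map] at hc
    obtain ⟨d, hd, rfl⟩ := hc
    rw [← List.drop_one] at hd
    have hp := List.all_eq_true.1 h1 d hd
    simp only [Bool.or_eq_true, beq_iff_eq] at hp
    refine pv_ok_upper d ?_
    unfold pvOK; tauto
  rw [pv_forbidden_eq u hOKu, pv_fold_eq u hOKu]
  set F := u.filter (fun c => c == '@' || c == '-') with hF
  by_cases hFnil : F = []
  · have hcond : (F.contains '@' || F.contains '-') = false := by
      rw [hFnil]; rfl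
    rw [hcond]
    simp only [Bool.false_eq_true, if_false, hFnil, List.length_nil,
      not_true_eq_false, if_false]
    have hid : u = u.flatMap pvF := by
      rw [hF] at hFnil
      have hnp : ∀ c ∈ u, ((c == '@' || c == '-') = false) := by
        intro c hc
        rcases Bool.eq_false_or_eq_true (c == '@' || c == '-') with ht | hf
        · exact absurd (List.mem_filter.2 ⟨hc, ht⟩) (by rw [hFnil]; simp)
        · exact hf
      have : u.flatMap pvF = u.flatMap (fun c => [c]) := by
        refine List.flatMap_congr (fun c hc => ?_)
        have := hnp c hc
        simp only [Bool.or_eq_false_iff, beq_eq_false_iff_ne, ne_eq] at this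
        simp [pvF, this.1, this.2]
      rw [this, List.flatMap_singleton']
    rw [← hid]
    exact pv_tail_eq u
  · have hcond : (F.contains '@' || F.contains '-') = true := by
      obtain ⟨c, hc⟩ := List.exists_mem_of_ne_nil F hFnil
      rw [hF] at hc
      have hp : (c == '@' || c == '-') = true := (List.mem_filter.1 hc).2
      rw [List.mem_filter] at hc
      rcases Bool.or_eq_true_iff.1 hp with h' | h'
      · rw [beq_iff_eq] at h'; subst h'
        refine Bool.or_eq_true_iff.2 (Or.inl ?_)
        rw [List.contains_eq_mem, decide_eq_true_iff, hF]
        exact List.mem_filter.2 hc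
      · rw [beq_iff_eq] at h'; subst h'
        refine Bool.or_eq_true_iff.2 (Or.inr ?_)
        rw [List.contains_eq_mem, decide_eq_true_iff, hF]
        exact List.mem_filter.2 hc
    rw [hcond]
    have hf2 : F.filter (fun sym => !(['@', '-'].contains sym)) = [] := by
      rw [List.filter_eq_nil_iff]
      intro c hc
      rw [hF] at hc
      have hp : (c == '@' || c == '-') = true := (List.mem_filter.1 hc).2
      rcases Bool.or_eq_true_iff.1 hp with h' | h' <;>
        (rw [beq_iff_eq] at h'; subst h'; decide)
    simp only [if_true, hf2, List.length_nil, not_true_eq_false, if_false]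
    rw [pv_chain u]
    exact pv_tail_eq (u.flatMap pvF)
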